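-- pv_equiv track=rewrite | github.com/cj81499/advent-of-code | src/aoc_cj/aoc2022/day25.py | base_10_to_snafu
-- ===== SOURCE A (Python) =====
-- def numberToBase(n: int, base: int) -> list[int]:
--     if n == 0:
--         return [0]
--     digits: list[int] = []
--     while n:
--         n, rem = divmod(n, base)
--         digits.append(rem)
--     return digits[::-1]
--
-- def base_10_to_snafu(n: int) -> str:
--     base_5 = numberToBase(n, 5)
--     rev_base_5 = list(reversed(base_5))
--
--     snafu: list[str] = []
--     i = 0
--     while i < len(rev_base_5):
--         n_at_i = rev_base_5[i]
--         snafu.append(["0", "1", "2", "=", "-"][n_at_i])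
--         if n_at_i > 2:
--             j = i + 1
--             if j <= len(rev_base_5):
--                 rev_base_5.append(0)
--             rev_base_5[j] += 1
--             while rev_base_5[j] == 5:
--                 rev_base_5[j] = 0
--                 j += 1
--                 if j <= len(rev_base_5):
--                     rev_base_5.append(0)
--                 rev_base_5[j] += 1
--         i += 1
--
--     return "".join(reversed(snafu)).lstrip("0")
-- ===== SOURCE B (Python) =====
-- def base_10_to_snafu(n: int) -> str:
--     # Single fused loop: base-5 conversion with the SNAFU carry folded in.
--     digits = []
--     while n > 0:
--         n, rem = divmod(n, 5)
--         if rem <= 2: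
--             digits.append(str(rem))
--         else:
--             digits.append("=" if rem == 3 else "-")
--             n += 1  # carry
--     return "".join(reversed(digits))
-- ===== Notes on version B (the rewrite author's own statement) =====
-- stated objective: simpler
-- what changed: Replaces A's two-phase pipeline (full base-5 digit list, then an in-place carry-propagation pass with index juggling and list appends, then join/lstrip) by one divmod loop that folds the carry into the conversion (n += 1 when the remainder is 3 or 4), needing no intermediate digit array and no lstrip.
import Mathlib
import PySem

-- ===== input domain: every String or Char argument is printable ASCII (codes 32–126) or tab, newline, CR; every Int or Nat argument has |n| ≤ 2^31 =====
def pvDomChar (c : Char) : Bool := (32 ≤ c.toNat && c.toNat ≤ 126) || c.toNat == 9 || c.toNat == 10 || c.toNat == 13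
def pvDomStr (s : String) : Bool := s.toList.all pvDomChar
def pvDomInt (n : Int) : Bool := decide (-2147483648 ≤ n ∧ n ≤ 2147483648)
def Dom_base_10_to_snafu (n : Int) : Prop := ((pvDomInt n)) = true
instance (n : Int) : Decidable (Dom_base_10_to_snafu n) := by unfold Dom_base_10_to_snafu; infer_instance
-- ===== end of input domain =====

-- B replaces A's two-phase pipeline (base-5 digit list, then an in-place carry-propagation pass,
-- then join/lstrip) by one divmod loop with the carry folded in (objective: simpler).

-- ===== PORT A =====

-- the `while n:` loop of numberToBase; the guard `n ≤ 0 ∨ base ≤ 1` only makes the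
-- recursion total (A is only ever reached with base = 5, and Pre_ restricts to 0 ≤ n,
-- where `while n:` is exactly `while n > 0:`)
def numberToBaseLoop (n base : Int) (digits : List Int) : List Int :=
  if n ≤ 0 ∨ base ≤ 1 then digits
  else numberToBaseLoop (PySem.Int.floordiv n base) base (digits ++ [PySem.Int.mod n base])
termination_by n.toNat
decreasing_by
  rename_i h
  rw [not_or, Int.not_le, Int.not_le] at h
  have h1 : PySem.Int.floordiv n base = n / base := PySem.Int.floordiv_eq_ediv_of_pos (by omega)
  have h2 : n / base < n := by
    rw [Int.ediv_lt_iff_lt_mul (by omega)]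
    nlinarith [h.1, h.2]
  omega


def numberToBase (n base : Int) : List Int :=
  if n = 0 then [0]
  else (numberToBaseLoop n base []).reverse   -- digits[::-1]

-- weight measure used only for termination of A's carry loop
def valW : List Int → Nat
  | [] => 0
  | d :: r => d.natAbs + 5 * valW r

-- A's carry step, seen on the suffix of rev_base_5 starting at j = i + 1:
-- `if j <= len: append(0)` (always true there), `rev_base_5[j] += 1`, and the
-- `while rev_base_5[j] == 5: rev_base_5[j] = 0; j += 1; append(0); rev_base_5[j] += 1` cascade.
def applyCarry : List Int → List Int
  | [] => [1]
  | x :: xs => if x + 1 = 5 then 0 :: applyCarry (xs ++ [0]) else (x + 1) :: (xs ++ [0])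
termination_by l => l.count 4
decreasing_by
  rename_i h
  have hx : x = 4 := by omega
  subst hx
  simp [List.count_append]

lemma valW_append_zero (xs : List Int) : valW (xs ++ [0]) = valW xs := by
  induction xs with
  | nil => simp [valW]
  | cons a t ih => simp [valW, ih]

lemma valW_applyCarry_le (l : List Int) : valW (applyCarry l) ≤ valW l + 1 := by
  induction l using applyCarry.induct with
  | case1 => simp [applyCarry, valW]
  | case2 x xs h ih =>
      rw [applyCarry, if_pos h]
      simp only [valW, valW_append_zero] at *
      omega
  | case3 x xs h =>
      rw [applyCarry, if_neg h]
      simp only [valW, valW_append_zero]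
      omega

-- A's `while i < len(rev_base_5)` loop, as recursion on the suffix from position i
-- (cells before i are never read or written again; appends land inside the suffix).
def carryLoop : List Int → List String
  | [] => []
  | d :: rest =>
    -- ["0", "1", "2", "=", "-"][n_at_i]; IndexError = default never hit on Pre_ (digits stay in 0..4)
    let ch := PySem.List.pyGetD ["0", "1", "2", "=", "-"] d ""
    if d > 2 then ch :: carryLoop (applyCarry rest) else ch :: carryLoop rest
termination_by l => (valW l, l.length)
decreasing_by
  · apply Prod.Lex.left
    have := valW_applyCarry_le rest
    simp only [valW]
    omega
  · rcases Nat.lt_or_ge (valW rest) (valW (d :: rest)) with h | h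
    · exact Prod.Lex.left _ _ h
    · have : valW rest = valW (d :: rest) := by simp only [valW] at h ⊢; omega
      rw [this]
      exact Prod.Lex.right _ (by simp)

def base_10_to_snafu (n : Int) : String :=
  let base_5 := numberToBase n 5
  let rev_base_5 := base_5.reverse              -- list(reversed(base_5))
  let snafu := carryLoop rev_base_5
  -- "".join(reversed(snafu)).lstrip("0"); `.lstrip("0")` is ported by hand as
  -- dropWhile (· == '0') on the code points — exact (drops exactly the leading '0's)
  String.ofList ((PySem.Str.join "" snafu.reverse).toList.dropWhile (· == '0'))

-- ===== PORT B =====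

-- the `while n > 0:` loop of Source B, accumulating the little-endian digit strings
def altLoop (n : Int) (digits : List String) : List String :=
  if n ≤ 0 then digits
  else
    let q := PySem.Int.floordiv n 5
    let rem := PySem.Int.mod n 5
    if rem ≤ 2 then altLoop q (digits ++ [PySem.Int.toStr rem])
    else altLoop (q + 1) (digits ++ [if rem = 3 then "=" else "-"])
termination_by n.toNat
decreasing_by
  all_goals
    rename_i hn hr
    simp only [rem, PySem.Int.mod_eq_emod_of_pos (a := n) (b := 5) (by norm_num)] at hr
    rw [PySem.Int.floordiv_eq_ediv_of_pos (by norm_num)]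
    omega

def base_10_to_snafu_alt (n : Int) : String :=
  PySem.Str.join "" (altLoop n []).reverse      -- "".join(reversed(digits))

-- ===== PRECONDITION & SPEC =====

-- A's `while n:` never terminates for n < 0 (divmod keeps n at -1); Pre_ excludes
-- exactly those inputs, on which A returns nothing.
def Pre_base_10_to_snafu (n : Int) : Prop := 0 ≤ n
instance (n : Int) : Decidable (Pre_base_10_to_snafu n) := by unfold Pre_base_10_to_snafu; infer_instance
def pvWitness_base_10_to_snafu : Int := 2022

def Spec_base_10_to_snafu (n : Int) (out : String) : Prop := out = base_10_to_snafu_alt n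
instance (n : Int) (out : String) : Decidable (Spec_base_10_to_snafu n out) := by unfold Spec_base_10_to_snafu; infer_instance

-- ===== CLAIM (what is proved, stated in full; the proofs are below) =====
def Claim_equal_base_10_to_snafu : Prop := ∀ (n : Int), Dom_base_10_to_snafu n → Pre_base_10_to_snafu n → Spec_base_10_to_snafu n (base_10_to_snafu n)

-- ===== LEMMAS AND PROOFS =====

lemma altLoop_q_lt (n : Int) (h : ¬ n ≤ 0) : (PySem.Int.floordiv n 5).toNat < n.toNat := by
  rw [PySem.Int.floordiv_eq_ediv_of_pos (by norm_num)]; omega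

lemma altLoop_q1_lt (n : Int) (h : ¬ n ≤ 0) (hr : ¬ PySem.Int.mod n 5 ≤ 2) :
    (PySem.Int.floordiv n 5 + 1).toNat < n.toNat := by
  rw [PySem.Int.mod_eq_emod_of_pos (a := n) (b := 5) (by norm_num)] at hr
  rw [PySem.Int.floordiv_eq_ediv_of_pos (by norm_num)]; omega

lemma altLoop_acc : ∀ (N : Nat) (n : Int), n.toNat = N → ∀ acc, altLoop n acc = acc ++ altLoop n [] := by
  intro N
  induction N using Nat.strong_induction_on with
  | _ N ih =>
    intro n hN acc
    by_cases h : n ≤ 0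
    · rw [altLoop, altLoop]; simp [h]
    · rw [altLoop, altLoop]
      simp only [h, if_false]
      split_ifs with hr h3
      · rw [ih _ (hN ▸ altLoop_q_lt n h) _ rfl (acc ++ [PySem.Int.toStr (PySem.Int.mod n 5)]),
            ih _ (hN ▸ altLoop_q_lt n h) _ rfl ([] ++ [PySem.Int.toStr (PySem.Int.mod n 5)])]
        simp
      · rw [ih _ (hN ▸ altLoop_q1_lt n h hr) _ rfl (acc ++ ["="]),
            ih _ (hN ▸ altLoop_q1_lt n h hr) _ rfl ([] ++ ["="])]
        simp
      · rw [ih _ (hN ▸ altLoop_q1_lt n h hr) _ rfl (acc ++ ["-"]),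
            ih _ (hN ▸ altLoop_q1_lt n h hr) _ rfl ([] ++ ["-"])]
        simp

def valL : List Int → Int
  | [] => 0
  | d :: r => d + 5 * valL r

def OkD (l : List Int) : Prop := ∀ d ∈ l, 0 ≤ d ∧ d < 5

lemma ntbLoop_acc : ∀ (N : Nat) (n : Int), n.toNat = N → ∀ acc,
    numberToBaseLoop n 5 acc = acc ++ numberToBaseLoop n 5 [] := by
  intro N
  induction N using Nat.strong_induction_on with
  | _ N ih =>
    intro n hN acc
    by_cases h : n ≤ 0
    · conv_lhs => rw [numberToBaseLoop]
      conv_rhs => rw [numberToBaseLoop]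
      simp [h]
    · have hc : ¬ (n ≤ 0 ∨ (5:Int) ≤ 1) := by omega
      conv_lhs => rw [numberToBaseLoop]
      conv_rhs => rw [numberToBaseLoop]
      simp only [hc, if_false]
      rw [ih _ (hN ▸ altLoop_q_lt n h) _ rfl (acc ++ [PySem.Int.mod n 5]),
          ih _ (hN ▸ altLoop_q_lt n h) _ rfl ([] ++ [PySem.Int.mod n 5])]
      simp

lemma ntb_spec : ∀ (N : Nat) (n : Int), n.toNat = N → 0 ≤ n →
    OkD (numberToBaseLoop n 5 []) ∧ valL (numberToBaseLoop n 5 []) = n := by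
  intro N
  induction N using Nat.strong_induction_on with
  | _ N ih =>
    intro n hN hn
    by_cases h : n ≤ 0
    · rw [numberToBaseLoop]
      simp only [h, true_or, if_true]
      refine ⟨fun d hd => by simp at hd, ?_⟩
      simp [valL]; omega
    · rw [numberToBaseLoop]
      have hc : ¬ (n ≤ 0 ∨ (5:Int) ≤ 1) := by omega
      simp only [hc, if_false]
      rw [ntbLoop_acc _ _ rfl ([] ++ [PySem.Int.mod n 5]), List.nil_append]
      have hq : 0 ≤ PySem.Int.floordiv n 5 := by
        rw [PySem.Int.floordiv_eq_ediv_of_pos (by norm_num)]; omega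
      obtain ⟨hok, hval⟩ := ih _ (hN ▸ altLoop_q_lt n h) _ rfl hq
      constructor
      · intro d hd
        rcases List.mem_cons.1 hd with rfl | hd
        · exact ⟨PySem.Int.mod_nonneg n (by norm_num), PySem.Int.mod_lt n (by norm_num)⟩
        · exact hok d hd
      · have := PySem.Int.floordiv_mul_add_mod n 5
        rw [List.singleton_append]
        have hv : valL (PySem.Int.mod n 5 :: numberToBaseLoop (PySem.Int.floordiv n 5) 5 []) =
            PySem.Int.mod n 5 + 5 * valL (numberToBaseLoop (PySem.Int.floordiv n 5) 5 []) := rfl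
        rw [hv, hval]
        omega

lemma okD_tail {d : Int} {l : List Int} (h : OkD (d :: l)) : OkD l :=
  fun x hx => h x (List.mem_cons_of_mem d hx)

lemma valL_append_zero (xs : List Int) : valL (xs ++ [0]) = valL xs := by
  induction xs with
  | nil => simp [valL]
  | cons a t ih => simp [valL, ih]

lemma okD_append_zero (xs : List Int) (h : OkD xs) : OkD (xs ++ [0]) := by
  intro d hd
  rcases List.mem_append.1 hd with h1 | h1
  · exact h d h1
  · simp at h1; omega

lemma valL_applyCarry (l : List Int) : valL (applyCarry l) = valL l + 1 := by
  induction l using applyCarry.induct with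
  | case1 => simp [applyCarry, valL]
  | case2 x xs h ih =>
      rw [applyCarry, if_pos h]
      simp only [valL, valL_append_zero] at *
      omega
  | case3 x xs h =>
      rw [applyCarry, if_neg h]
      simp only [valL, valL_append_zero]
      omega

lemma okD_applyCarry (l : List Int) (h : OkD l) : OkD (applyCarry l) := by
  induction l using applyCarry.induct with
  | case1 => intro d hd; simp [applyCarry] at hd; omega
  | case2 x xs hx ih =>
      rw [applyCarry, if_pos hx]
      intro d hd
      rcases List.mem_cons.1 hd with h1 | h1
      · omega
      · exact ih (okD_append_zero xs (okD_tail h)) d h1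
  | case3 x xs hx =>
      rw [applyCarry, if_neg hx]
      intro d hd
      rcases List.mem_cons.1 hd with h1 | h1
      · have := h x List.mem_cons_self; omega
      · exact okD_append_zero xs (okD_tail h) d h1

lemma valL_nonneg (l : List Int) (h : OkD l) : 0 ≤ valL l := by
  induction l with
  | nil => simp [valL]
  | cons a t ih =>
      have ha := h a List.mem_cons_self
      have := ih (okD_tail h)
      have hv : valL (a :: t) = a + 5 * valL t := rfl
      omega

lemma altLoop_zero : altLoop 0 [] = [] := by
  rw [altLoop]; simp

lemma altLoop_pos_le2 (v : Int) (h : 0 < v) (hr : PySem.Int.mod v 5 ≤ 2) :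
    altLoop v [] = PySem.Int.toStr (PySem.Int.mod v 5) :: altLoop (PySem.Int.floordiv v 5) [] := by
  conv_lhs => rw [altLoop]
  simp only [show ¬ v ≤ 0 by omega, if_false, hr, if_true]
  rw [altLoop_acc _ _ rfl ([] ++ [PySem.Int.toStr (PySem.Int.mod v 5)])]
  simp

lemma altLoop_pos_gt2 (v : Int) (h : 0 < v) (hr : ¬ PySem.Int.mod v 5 ≤ 2) :
    altLoop v [] = (if PySem.Int.mod v 5 = 3 then "=" else "-") :: altLoop (PySem.Int.floordiv v 5 + 1) [] := by
  conv_lhs => rw [altLoop]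
  simp only [show ¬ v ≤ 0 by omega, if_false, hr]
  split_ifs with h3
  · rw [altLoop_acc _ _ rfl ([] ++ ["="])]; simp
  · rw [altLoop_acc _ _ rfl ([] ++ ["-"])]; simp

lemma carry_spec (l : List Int) :
    OkD l → ∃ k, carryLoop l = altLoop (valL l) [] ++ List.replicate k "0" := by
  induction l using carryLoop.induct with
  | case1 =>
      intro _
      exact ⟨0, by simp [carryLoop, valL, altLoop_zero]⟩
  | case2 d rest hd ih =>
      intro hok
      have hrest := okD_tail hok
      have hdb := hok d List.mem_cons_self
      have hv0 := valL_nonneg rest hrest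
      obtain ⟨k, hk⟩ := ih (okD_applyCarry rest hrest)
      rw [valL_applyCarry] at hk
      have hvl : valL (d :: rest) = d + 5 * valL rest := rfl
      have hmod : PySem.Int.mod (valL (d :: rest)) 5 = d := by
        rw [PySem.Int.mod_eq_emod_of_pos (by norm_num), hvl]; omega
      have hdiv : PySem.Int.floordiv (valL (d :: rest)) 5 = valL rest := by
        rw [PySem.Int.floordiv_eq_ediv_of_pos (by norm_num), hvl]; omega
      rw [carryLoop]
      simp only [hd, if_true]
      rw [altLoop_pos_gt2 _ (by omega) (by omega), hmod, hdiv, hk]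
      refine ⟨k, ?_⟩
      obtain ⟨hd0, hd5⟩ := hdb
      have : PySem.List.pyGetD ["0", "1", "2", "=", "-"] d "" = (if d = 3 then "=" else "-") := by
        interval_cases d <;> rfl
      rw [this]
      simp
  | case3 d rest hd ih =>
      intro hok
      have hrest := okD_tail hok
      have hdb := hok d List.mem_cons_self
      have hv0 := valL_nonneg rest hrest
      obtain ⟨k, hk⟩ := ih hrest
      have hvl : valL (d :: rest) = d + 5 * valL rest := rfl
      by_cases hz : d = 0 ∧ valL rest = 0
      · have hval0 : valL (d :: rest) = 0 := by omega
        refine ⟨k + 1, ?_⟩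
        rw [carryLoop]
        simp only [hd, if_false]
        rw [hval0, altLoop_zero]
        rw [hz.2, altLoop_zero] at hk
        simp only [List.nil_append] at hk ⊢
        rw [hk, hz.1, List.replicate_succ]
        rfl
      · have hpos : 0 < valL (d :: rest) := by omega
        have hmod : PySem.Int.mod (valL (d :: rest)) 5 = d := by
          rw [PySem.Int.mod_eq_emod_of_pos (by norm_num), hvl]; omega
        have hdiv : PySem.Int.floordiv (valL (d :: rest)) 5 = valL rest := by
          rw [PySem.Int.floordiv_eq_ediv_of_pos (by norm_num), hvl]; omega
        rw [carryLoop]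
        simp only [hd, if_false]
        rw [altLoop_pos_le2 _ hpos (by omega), hmod, hdiv, hk]
        refine ⟨k, ?_⟩
        obtain ⟨hd0, hd5⟩ := hdb
        have : PySem.List.pyGetD ["0", "1", "2", "=", "-"] d "" = PySem.Int.toStr d := by
          interval_cases d <;> rfl
        rw [this]
        simp

lemma rev_spec (n : Int) (h : 0 ≤ n) :
    OkD ((numberToBase n 5).reverse) ∧ valL ((numberToBase n 5).reverse) = n := by
  by_cases h0 : n = 0
  · subst h0
    constructor
    · intro d hd; simp [numberToBase] at hd; omega
    · simp [numberToBase]; rfl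
  · rw [numberToBase]
    simp only [h0, if_false, List.reverse_reverse]
    exact ntb_spec n.toNat n rfl h

lemma getLast?_cons_ne {α : Type} (a : α) (l : List α) (h : l ≠ []) :
    (a :: l).getLast? = l.getLast? := by
  rcases l with _ | ⟨b, t⟩
  · simp at h
  · simp [List.getLast?_cons_cons]

-- the single characters B's digit strings are made of
lemma alt_singletons : ∀ (N : Nat) (n : Int), n.toNat = N → 0 ≤ n →
    ∃ cs : List Char, altLoop n [] = cs.map (fun c => String.ofList [c]) ∧
      (0 < n → ∃ c, cs.getLast? = some c ∧ (c = '1' ∨ c = '2')) := by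
  intro N
  induction N using Nat.strong_induction_on with
  | _ N ih =>
    intro n hN hn
    by_cases h0 : n ≤ 0
    · refine ⟨[], ?_, by omega⟩
      have : n = 0 := by omega
      subst this
      simp [altLoop_zero]
    · have hm0 : 0 ≤ PySem.Int.mod n 5 := PySem.Int.mod_nonneg n (by norm_num)
      have hm5 : PySem.Int.mod n 5 < 5 := PySem.Int.mod_lt n (by norm_num)
      have hq0 : 0 ≤ PySem.Int.floordiv n 5 := by
        rw [PySem.Int.floordiv_eq_ediv_of_pos (by norm_num)]; omega
      have hnm : PySem.Int.floordiv n 5 * 5 + PySem.Int.mod n 5 = n :=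
        PySem.Int.floordiv_mul_add_mod n 5
      by_cases hr : PySem.Int.mod n 5 ≤ 2
      · obtain ⟨cs', hcs', hlast'⟩ := ih _ (hN ▸ altLoop_q_lt n h0) _ rfl hq0
        set r := PySem.Int.mod n 5 with hrdef
        have hc : ∃ c, PySem.Int.toStr r = String.ofList [c] ∧ (r = 0 → c = '0') ∧ (r ≠ 0 → (c = '1' ∨ c = '2')) := by
          interval_cases r
          · exact ⟨'0', rfl, fun _ => rfl, by simp⟩
          · exact ⟨'1', rfl, by simp, fun _ => Or.inl rfl⟩
          · exact ⟨'2', rfl, by simp, fun _ => Or.inr rfl⟩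
        obtain ⟨c0, hc0, hc00, hc012⟩ := hc
        refine ⟨c0 :: cs', ?_, ?_⟩
        · rw [altLoop_pos_le2 n (by omega) hr, hcs', hc0]
          simp
        · intro _
          by_cases hq : PySem.Int.floordiv n 5 = 0
          · have : cs' = [] := by
              rw [hq, altLoop_zero] at hcs'
              exact (List.map_eq_nil_iff.mp hcs'.symm)
            subst this
            refine ⟨c0, by simp, hc012 (by omega)⟩
          · obtain ⟨c, hcl, hc12⟩ := hlast' (by omega)
            refine ⟨c, ?_, hc12⟩
            have hne : cs' ≠ [] := by
              intro he; rw [he] at hcl; simp at hcl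
            rw [getLast?_cons_ne _ _ hne]
            exact hcl
      · obtain ⟨cs', hcs', hlast'⟩ := ih _ (hN ▸ altLoop_q1_lt n h0 hr) _ rfl (by omega)
        have hq1 : 0 < PySem.Int.floordiv n 5 + 1 := by omega
        obtain ⟨c, hcl, hc12⟩ := hlast' hq1
        have hne : cs' ≠ [] := by intro he; rw [he] at hcl; simp at hcl
        refine ⟨(if PySem.Int.mod n 5 = 3 then '=' else '-') :: cs', ?_, ?_⟩
        · rw [altLoop_pos_gt2 n (by omega) hr, hcs']
          simp only [List.map_cons]
          split_ifs <;> rfl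
        · intro _
          refine ⟨c, ?_, hc12⟩
          rw [getLast?_cons_ne _ _ hne]
          exact hcl

lemma join_single (cs : List Char) :
    (PySem.Str.join "" (cs.map (fun c => String.ofList [c]))).toList = cs := by
  rw [PySem.Str.toList_join]
  have h1 : ("" : String).toList = [] := rfl
  rw [h1, List.map_map]
  have h2 : (String.toList ∘ fun c => String.ofList [c]) = fun c => [c] := by
    funext c; simp [String.toList_ofList]
  rw [h2]
  exact PySem.Chars.join_nil_singletons cs

lemma drop_zeros (k : Nat) (ys : List Char) :
    List.dropWhile (· == '0') (List.replicate k '0' ++ ys) = List.dropWhile (· == '0') ys := by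
  induction k with
  | zero => simp
  | succ m ih => simp [List.replicate_succ, ih]

theorem a_eq_b (n : Int) (hn : 0 ≤ n) : base_10_to_snafu n = base_10_to_snafu_alt n := by
  obtain ⟨hok, hval⟩ := rev_spec n hn
  obtain ⟨k, hk⟩ := carry_spec _ hok
  rw [hval] at hk
  obtain ⟨cs, hcs, hlast⟩ := alt_singletons n.toNat n rfl hn
  simp only [base_10_to_snafu, base_10_to_snafu_alt]
  rw [hk, hcs]
  have hrep : List.replicate k "0" = (List.replicate k '0').map (fun c => String.ofList [c]) := by
    rw [List.map_replicate]
  rw [hrep, ← List.map_append, ← List.map_reverse, join_single,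
      List.reverse_append, List.reverse_replicate, drop_zeros]
  by_cases h0 : n = 0
  · have hcs0 : cs = [] := by
      subst h0
      rw [altLoop_zero] at hcs
      exact List.map_eq_nil_iff.mp hcs.symm
    subst hcs0
    rfl
  · obtain ⟨c, hcl, hc12⟩ := hlast (by omega)
    obtain ⟨cs', rfl⟩ := List.getLast?_eq_some_iff.mp hcl
    rw [List.reverse_append]
    have hstep : List.dropWhile (· == '0') (c :: cs'.reverse) = c :: cs'.reverse := by
      rcases hc12 with rfl | rfl <;> simp [List.dropWhile]
    simp only [List.reverse_cons, List.reverse_nil, List.nil_append, List.singleton_append]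
    rw [hstep]
    refine String.toList_inj.mp ?_
    rw [String.toList_ofList, ← List.map_reverse, join_single]
    simp

-- ===== VERDICT (by name: the statement is the Claim_ definition above) =====
theorem base_10_to_snafu_spec : Claim_equal_base_10_to_snafu := by
  intro n _ hpre
  exact a_eq_b n hpre
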